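-- pv_equiv track=rewrite | github.com/Acver14/forCodingTest | 2022/10/25_week/pm/롤케이크_자르기.py | solution
-- ===== SOURCE A (Python) =====
-- from collections import deque, defaultdict
--
-- def solution(topping):
--     answer = 0
--     topping = deque(topping)
--     toppings = defaultdict(int)
--     for t in topping:
--         toppings[t] += 1
--
--     ch = set()
--     i = 0
--     for i in range(len(topping)):
--         t = topping.popleft()
--         ch.add(t)
--         toppings[t] -= 1
--         if toppings[t] == 0:
--             del toppings[t]
--         if len(ch) == len(toppings.keys()):
--             answer += 1
--
--     return answer
-- ===== SOURCE B (Python) =====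
-- def solution(topping):
--     n = len(topping)
--     suffix = [0] * (n + 1)
--     seen = set()
--     for i in range(n - 1, -1, -1):
--         seen.add(topping[i])
--         suffix[i] = len(seen)
--     answer = 0
--     left = set()
--     for i, t in enumerate(topping):
--         left.add(t)
--         if len(left) == suffix[i + 1]:
--             answer += 1
--     return answer
-- ===== Notes on version B (the rewrite author's own statement) =====
-- stated objective: alternative
-- what changed: Replaces A's fused single pass that incrementally decrements a Counter dict (with key deletion) while growing a left set, by two separate passes: a right-to-left pass precomputing a suffix-distinct table with a running set, then a left-to-right pass comparing the left set's size against the table.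
import Mathlib
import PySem

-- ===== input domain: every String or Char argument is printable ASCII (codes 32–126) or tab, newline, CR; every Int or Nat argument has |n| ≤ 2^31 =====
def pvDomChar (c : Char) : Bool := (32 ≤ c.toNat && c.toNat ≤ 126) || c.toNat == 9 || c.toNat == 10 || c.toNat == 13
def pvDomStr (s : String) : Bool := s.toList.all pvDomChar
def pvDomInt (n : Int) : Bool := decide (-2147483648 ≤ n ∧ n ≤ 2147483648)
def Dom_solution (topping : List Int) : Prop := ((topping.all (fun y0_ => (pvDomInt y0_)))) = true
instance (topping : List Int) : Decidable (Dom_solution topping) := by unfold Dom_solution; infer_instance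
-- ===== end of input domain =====

-- B replaces A's fused incremental Counter pass by a precomputed suffix-distinct table plus a separate left-to-right pass (alternative decomposition, same cost).

-- ===== PORT A =====
-- A: build a count dict of all toppings, then one pass popping from the left:
-- add to the left set, decrement (and delete at zero) in the dict, count when the sizes match.
def stepA (st : PySem.Set Int × PySem.Dict Int Int × Int) (t : Int) :
    PySem.Set Int × PySem.Dict Int Int × Int :=
  let ch := PySem.Set.add st.1 t
  let c := st.2.1.getD t 0 - 1
  let d1 := st.2.1.insert t c
  let d := if c = 0 then d1.erase t else d1
  (ch, d, if ch.length = d.keys.length then st.2.2 + 1 else st.2.2)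

def solution (topping : List Int) : Int :=
  let toppings : PySem.Dict Int Int :=
    topping.foldl (fun d t => d.modify t 0 (· + 1)) PySem.Dict.empty
  let st := topping.foldl stepA (PySem.Set.empty, toppings, 0)
  st.2.2

-- ===== PORT B =====
-- B: right-to-left pass filling suffix[i] = #distinct of topping[i:] (suffix has length n+1, last entry 0),
-- then a left-to-right pass over enumerate(topping) growing a left set and comparing with suffix[i+1].
-- suffix[i+1] is always in range in the Python, so pyGetD with default 0 is exact here.
def stepSuf (st : PySem.Set Int × List Int) (x : Int) : PySem.Set Int × List Int :=
  let s := PySem.Set.add st.1 x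
  (s, (s.length : Int) :: st.2)

def stepB (suffix : List Int) (st : PySem.Set Int × Int) (it : Int × Int) : PySem.Set Int × Int :=
  let l := PySem.Set.add st.1 it.2
  (l, if (l.length : Int) = PySem.List.pyGetD suffix (it.1 + 1) 0 then st.2 + 1 else st.2)

def solution_alt (topping : List Int) : Int :=
  let suf := topping.reverse.foldl stepSuf (PySem.Set.empty, [(0 : Int)])
  let res := (PySem.List.enumerate topping).foldl (stepB suf.2) (PySem.Set.empty, 0)
  res.2

-- ===== PRECONDITION & SPEC =====
def Spec_solution (topping : List Int) (out : Int) : Prop := out = solution_alt topping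
instance (topping : List Int) (out : Int) : Decidable (Spec_solution topping out) := by unfold Spec_solution; infer_instance

-- ===== CLAIM (what is proved, stated in full; the proofs are below) =====
def Claim_equal_solution : Prop := ∀ (topping : List Int), Dom_solution topping → Spec_solution topping (solution topping)

-- ===== LEMMAS AND PROOFS =====

-- number of distinct elements of a list
def distinct (xs : List Int) : Nat := (PySem.Set.ofList xs).length

-- the common specification both loops compute: walk the list growing the left set,
-- count the positions where the left set's size equals the distinct count of the rest
def spec : List Int → PySem.Set Int → Int
  | [], _ => 0
  | t :: r, ch =>
      (if (PySem.Set.add ch t).length = distinct r then (1 : Int) else 0) + spec r (PySem.Set.add ch t)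

lemma length_eq_distinct (s : PySem.Set Int) (r : List Int) (hn : s.Nodup)
    (hm : ∀ v, v ∈ s ↔ v ∈ r) : s.length = distinct r := by
  have hperm : s.Perm (PySem.Set.ofList r) := by
    rw [List.perm_ext_iff_of_nodup hn (PySem.Set.nodup_ofList r)]
    intro v
    rw [hm v, PySem.Set.mem_ofList]
  exact hperm.length_eq

-- ---- Dict.erase facts (not in the PySem lemma book) ----
lemma get?_erase (d : PySem.Dict Int Int) (k k' : Int) :
    (d.erase k).get? k' = if k' = k then none else d.get? k' := by
  obtain ⟨items⟩ := d
  induction items with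
  | nil => simp [PySem.Dict.erase, PySem.Dict.get?]
  | cons p rest ih =>
      by_cases hpk : p.1 = k
      · by_cases hk : k' = k
        · simp [PySem.Dict.erase, PySem.Dict.get?, hpk, hk]
        · have hne : ¬ (p.1 = k') := fun h => hk (h ▸ hpk ▸ rfl)
          have hkk : ¬ (k = k') := fun h => hk h.symm
          simpa [PySem.Dict.erase, PySem.Dict.get?, List.find?_cons, hk,
            hne, hkk] using ih
      · by_cases hpk' : p.1 = k'
        · have hk : ¬ (k' = k) := fun h => hpk (hpk'.trans h)
          simp [PySem.Dict.erase, PySem.Dict.get?, hpk', hk]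
        · simpa [PySem.Dict.erase, PySem.Dict.get?, List.filter_cons, List.find?_cons, hpk, hpk']
            using ih

lemma getD_erase (d : PySem.Dict Int Int) (k k' : Int) (d0 : Int) :
    (d.erase k).getD k' d0 = if k' = k then d0 else d.getD k' d0 := by
  simp only [PySem.Dict.getD, get?_erase]
  split <;> rfl

lemma mem_keys_erase (d : PySem.Dict Int Int) (k k' : Int) :
    k' ∈ (d.erase k).keys ↔ k' ∈ d.keys ∧ k' ≠ k := by
  simp only [PySem.Dict.keys, PySem.Dict.erase, List.mem_map, List.mem_filter]
  constructor
  · rintro ⟨p, ⟨hp, hne⟩, rfl⟩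
    exact ⟨⟨p, hp, rfl⟩, by simpa using hne⟩
  · rintro ⟨⟨p, hp, rfl⟩, hne⟩
    exact ⟨p, ⟨hp, by simpa using hne⟩, rfl⟩

lemma nodup_keys_erase (d : PySem.Dict Int Int) (k : Int) (h : d.keys.Nodup) :
    (d.erase k).keys.Nodup := by
  simp only [PySem.Dict.keys, PySem.Dict.erase] at *
  exact h.sublist (List.Sublist.map _ List.filter_sublist)

-- ---- A's main loop computes `spec` ----
lemma A_loop : ∀ (s : List Int) (ch : PySem.Set Int) (d : PySem.Dict Int Int) (ans : Int),
    d.keys.Nodup → (∀ v, d.getD v 0 = (s.count v : Int)) → (∀ v, v ∈ d.keys ↔ v ∈ s) →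
    (s.foldl stepA (ch, d, ans)).2.2 = ans + spec s ch := by
  intro s
  induction s with
  | nil => intro ch d ans _ _ _; simp [spec]
  | cons t r ih =>
      intro ch d ans hnd hcount hmem
      have hc : d.getD t 0 - 1 = ((r.count t : Nat) : Int) := by
        rw [hcount t]; push_cast [List.count_cons_self]; ring
      set c : Int := d.getD t 0 - 1 with hcdef
      set d1 := d.insert t c with hd1
      set d' := if c = 0 then d1.erase t else d1 with hd'
      have hgetD1 : ∀ v, d1.getD v 0 = if v = t then c else d.getD v 0 := by
        intro v; rw [hd1, PySem.Dict.getD_insert]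
      have hmem1 : ∀ v, v ∈ d1.keys ↔ v = t ∨ v ∈ d.keys := by
        intro v; rw [hd1, PySem.Dict.mem_keys_insert]
      have hnd1 : d1.keys.Nodup := PySem.Dict.nodup_keys_insert _ _ _ hnd
      -- invariants for the tail r
      have hnd' : d'.keys.Nodup := by
        rw [hd']; split
        · exact nodup_keys_erase _ _ hnd1
        · exact hnd1
      have hcount' : ∀ v, d'.getD v 0 = (r.count v : Int) := by
        intro v
        rw [hd']
        by_cases hc0 : c = 0
        · have htr : r.count t = 0 := by
            have := hc; rw [hc0] at this; exact_mod_cast this.symm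
          rw [if_pos hc0, getD_erase]
          by_cases hv : v = t
          · rw [if_pos hv, hv, htr]; simp
          · rw [if_neg hv, hgetD1, if_neg hv, hcount v]
            simp [Ne.symm hv]
        · rw [if_neg hc0, hgetD1]
          by_cases hv : v = t
          · rw [if_pos hv, hv, hc]
          · rw [if_neg hv, hcount v]
            simp [Ne.symm hv]
      have hmem' : ∀ v, v ∈ d'.keys ↔ v ∈ r := by
        intro v
        rw [hd']
        by_cases hc0 : c = 0
        · have htr : t ∉ r := by
            have h0 : r.count t = 0 := by
              have := hc; rw [hc0] at this; exact_mod_cast this.symm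
            exact List.count_eq_zero.mp h0
          rw [if_pos hc0, mem_keys_erase]
          constructor
          · rintro ⟨hv1, hvt⟩
            rcases (hmem1 v).mp hv1 with h | h
            · exact absurd h hvt
            · rcases List.mem_cons.mp ((hmem v).mp h) with h2 | h2
              · exact absurd h2 hvt
              · exact h2
          · intro hv
            have hvt : v ≠ t := fun h => htr (h ▸ hv)
            exact ⟨(hmem1 v).mpr (Or.inr ((hmem v).mpr (List.mem_cons_of_mem _ hv))), hvt⟩
        · have htr : t ∈ r := by
            have h0 : r.count t ≠ 0 := by
              intro h0
              apply hc0
              rw [hc, h0]; simp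
            exact List.count_pos_iff.mp (Nat.pos_of_ne_zero h0)
          rw [if_neg hc0, hmem1]
          constructor
          · rintro (rfl | hv)
            · exact htr
            · rcases List.mem_cons.mp ((hmem v).mp hv) with rfl | h
              · exact htr
              · exact h
          · intro hv
            exact Or.inr ((hmem v).mpr (List.mem_cons_of_mem _ hv))
      -- the counting condition equals spec's condition
      have hlen : d'.keys.length = distinct r := length_eq_distinct _ _ hnd' hmem'
      have hstep : stepA (ch, d, ans) t =
          (PySem.Set.add ch t, d',
            ans + if (PySem.Set.add ch t).length = distinct r then (1 : Int) else 0) := by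
        simp only [stepA, ← hcdef, ← hd1, ← hd', hlen]
        split <;> simp
      rw [List.foldl_cons, hstep, ih _ _ _ hnd' hcount' hmem', spec]
      ring

-- ---- B's suffix pass builds the suffix-distinct table ----
def suffList : List Int → List Int
  | [] => [(0 : Int)]
  | x :: r => ((distinct (x :: r) : Nat) : Int) :: suffList r

lemma suffix_build : ∀ (xs : List Int),
    xs.reverse.foldl stepSuf (PySem.Set.empty, [(0 : Int)]) =
      (PySem.Set.ofList xs.reverse, suffList xs) := by
  intro xs
  rw [List.foldl_reverse]
  induction xs with
  | nil => rfl
  | cons x r ih =>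
      rw [List.foldr_cons, ih]
      have h1 : PySem.Set.add (PySem.Set.ofList r.reverse) x = PySem.Set.ofList (x :: r).reverse := by
        rw [List.reverse_cons, PySem.Set.ofList_append_singleton]
      have h2 : (PySem.Set.add (PySem.Set.ofList r.reverse) x).length = distinct (x :: r) := by
        apply length_eq_distinct
        · exact PySem.Set.nodup_add _ _ (PySem.Set.nodup_ofList _)
        · intro v
          rw [PySem.Set.mem_add, PySem.Set.mem_ofList, List.mem_reverse, List.mem_cons]
          tauto
      simp only [stepSuf, suffList]
      rw [h2, h1]

lemma suffList_getD : ∀ (xs : List Int) (j : Nat),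
    (suffList xs).getD j 0 = ((distinct (xs.drop j) : Nat) : Int) := by
  intro xs
  induction xs with
  | nil =>
      intro j
      cases j <;> simp [suffList, distinct, PySem.Set.ofList]
  | cons x r ih =>
      intro j
      cases j with
      | zero => simp [suffList]
      | succ j => simpa [suffList] using ih j

-- ---- B's main loop computes `spec` ----
lemma B_loop : ∀ (r : List Int) (S : List Int) (s : Int) (left : PySem.Set Int) (ans : Int),
    (∀ j : Nat, PySem.List.pyGetD S (s + 1 + (j : Int)) 0 = ((distinct (r.drop (j + 1)) : Nat) : Int)) →
    ((PySem.List.enumerate r s).foldl (stepB S) (left, ans)).2 = ans + spec r left := by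
  intro r
  induction r with
  | nil => intro S s left ans _; simp [PySem.List.enumerate_nil, spec]
  | cons t r' ih =>
      intro S s left ans h
      have h0 : PySem.List.pyGetD S (s + 1) 0 = ((distinct r' : Nat) : Int) := by
        have := h 0
        simpa using this
      have hstep : stepB S (left, ans) (s, t) =
          (PySem.Set.add left t,
            ans + if (PySem.Set.add left t).length = distinct r' then (1 : Int) else 0) := by
        simp only [stepB, h0, Nat.cast_inj]
        split <;> simp
      rw [PySem.List.enumerate_cons, List.foldl_cons, hstep,
        ih S (s + 1) _ _ (by
          intro j
          have := h (j + 1)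
          have harith : s + 1 + ((j : Nat) + 1 : Int) = s + 1 + 1 + (j : Int) := by ring
          push_cast at this ⊢
          rw [← harith]
          simpa using this), spec]
      ring

-- ===== VERDICT (by name: the statement is the Claim_ definition above) =====
theorem solution_spec : Claim_equal_solution := by
  intro topping _
  unfold Spec_solution
  -- A's side
  have hA : solution topping = 0 + spec topping PySem.Set.empty := by
    have hcounter : topping.foldl (fun d t => d.modify t 0 (· + 1)) PySem.Dict.empty =
        PySem.Dict.counter topping := (PySem.Dict.counter_eq_foldl topping).symm
    show (topping.foldl stepA (PySem.Set.empty,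
      topping.foldl (fun d t => d.modify t 0 (· + 1)) PySem.Dict.empty, 0)).2.2 = _
    rw [hcounter]
    exact A_loop topping PySem.Set.empty (PySem.Dict.counter topping) 0
      (PySem.Dict.nodup_keys_counter topping)
      (fun v => PySem.Dict.getD_counter topping v)
      (fun v => by rw [PySem.Dict.keys_counter, PySem.Set.mem_ofList])
  -- B's side
  have hB : solution_alt topping = 0 + spec topping PySem.Set.empty := by
    show ((PySem.List.enumerate topping).foldl
      (stepB (topping.reverse.foldl stepSuf (PySem.Set.empty, [(0 : Int)])).2)
      (PySem.Set.empty, 0)).2 = _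
    rw [suffix_build]
    exact B_loop topping (suffList topping) 0 PySem.Set.empty 0 (by
      intro j
      have harith : (0 : Int) + 1 + (j : Int) = ((j + 1 : Nat) : Int) := by push_cast; ring
      rw [harith, PySem.List.pyGetD_natCast]
      exact suffList_getD topping (j + 1))
  rw [hA, hB]
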